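-- pv_equiv track=rewrite | github.com/iandtsoft-27452103/Asklepios | cnn/python_src/bitop.py | pext
-- ===== SOURCE A (Python) =====
-- def pext(bb_occupied, bb_mask):
--     res = 0
--     bb = 1
--     while bb_mask != 0:
--         x = bb_occupied & bb_mask & (~bb_mask + 1)
--         if x != 0:
--             res |= bb
--         bb_mask &= (bb_mask - 1)
--         bb += bb
--     return res
-- ===== SOURCE B (Python) =====
-- def pext(bb_occupied, bb_mask):
--     res = 0
--     m = bb_mask
--     i = 0
--     j = 0
--     while m != 0:
--         if m & 1:
--             if (bb_occupied >> i) & 1: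
--                 res |= 1 << j
--             j += 1
--         m >>= 1
--         i += 1
--     return res
-- ===== Notes on version B (the rewrite author's own statement) =====
-- stated objective: alternative
-- what changed: Replaces the lowest-set-bit isolation idiom (x = occ & mask & (~mask+1); mask &= mask-1; doubling bb) with a linear right-to-left bit scan keeping a source index i and destination index j, testing (occ >> i) & 1 and setting res |= 1 << j.
import Mathlib
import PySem

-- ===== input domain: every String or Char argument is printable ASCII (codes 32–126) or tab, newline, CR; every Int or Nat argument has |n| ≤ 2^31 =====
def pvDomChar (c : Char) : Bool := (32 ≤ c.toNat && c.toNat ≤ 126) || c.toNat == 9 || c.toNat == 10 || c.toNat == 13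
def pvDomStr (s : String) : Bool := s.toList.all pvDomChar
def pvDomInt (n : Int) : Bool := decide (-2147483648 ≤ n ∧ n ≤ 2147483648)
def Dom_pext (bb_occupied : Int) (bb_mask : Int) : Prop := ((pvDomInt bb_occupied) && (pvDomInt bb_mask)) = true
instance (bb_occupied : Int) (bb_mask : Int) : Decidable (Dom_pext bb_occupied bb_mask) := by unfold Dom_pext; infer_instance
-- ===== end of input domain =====

-- B replaces A's lowest-set-bit isolation idiom with a linear right-to-left bit scan
-- over the mask (objective: alternative, same cost).
-- Both Pythons loop forever when bb_mask < 0 (the mask never reaches 0) and so never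
-- return there; the ports run their loops on bb_mask.toNat (= bb_mask wherever the
-- Pythons return, i.e. bb_mask >= 0) and are total.

-- ===== PORT A =====
-- the while loop of A; bb_mask carried as a Nat (equal to the Python int for bb_mask ≥ 0)
def pextLoop (bb_occupied : Int) (bb_mask : Nat) (res : Int) (bb : Int) : Int :=
  if _h : bb_mask = 0 then res
  else
    let x : Int := PySem.Int.band (PySem.Int.band bb_occupied (bb_mask : Int)) (Int.not (bb_mask : Int) + 1)
    let res' : Int := if x ≠ 0 then PySem.Int.bor res bb else res
    pextLoop bb_occupied (bb_mask &&& (bb_mask - 1)) res' (bb + bb)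
termination_by bb_mask
decreasing_by exact lt_of_le_of_lt Nat.and_le_right (Nat.sub_lt (Nat.pos_of_ne_zero _h) one_pos)

def pext (bb_occupied : Int) (bb_mask : Int) : Int :=
  pextLoop bb_occupied bb_mask.toNat 0 1

-- ===== PORT B =====
-- the while loop of B; m carried as a Nat (equal to the Python int for bb_mask ≥ 0)
def pextAltLoop (bb_occupied : Int) (m : Nat) (i : Nat) (j : Nat) (res : Int) : Int :=
  if h : m = 0 then res
  else
    let res' : Int := if m &&& 1 ≠ 0 then
        (if PySem.Int.band (bb_occupied >>> i) 1 ≠ 0 then PySem.Int.bor res ((1:Int) <<< j) else res)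
      else res
    let j' : Nat := if m &&& 1 ≠ 0 then j + 1 else j
    pextAltLoop bb_occupied (m >>> 1) (i + 1) j' res'
termination_by m
decreasing_by simpa [Nat.shiftRight_one] using Nat.div_lt_self (Nat.pos_of_ne_zero h) one_lt_two

def pext_alt (bb_occupied : Int) (bb_mask : Int) : Int :=
  pextAltLoop bb_occupied bb_mask.toNat 0 0 0

-- ===== PRECONDITION & SPEC =====
def Spec_pext (bb_occupied : Int) (bb_mask : Int) (out : Int) : Prop := out = pext_alt bb_occupied bb_mask
instance (bb_occupied : Int) (bb_mask : Int) (out : Int) : Decidable (Spec_pext bb_occupied bb_mask out) := by unfold Spec_pext; infer_instance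

-- ===== CLAIM (what is proved, stated in full; the proofs are below) =====
def Claim_equal_pext : Prop := ∀ (bb_occupied : Int) (bb_mask : Int), Dom_pext bb_occupied bb_mask → Spec_pext bb_occupied bb_mask (pext bb_occupied bb_mask)

-- ===== LEMMAS AND PROOFS =====

-- ---- generic testBit toolkit ----

theorem itb_natCast (m : Nat) (k : Nat) : ((m : Int)).testBit k = m.testBit k := rfl

theorem itb_ext {a b : Int} (h : ∀ k, a.testBit k = b.testBit k) : a = b := by
  cases a with
  | ofNat m =>
    cases b with
    | ofNat n =>
      exact congrArg Int.ofNat (Nat.eq_of_testBit_eq h)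
    | negSucc n =>
      exfalso
      have h1 : m.testBit (m + n) = false := Nat.testBit_lt_two_pow
        (lt_of_lt_of_le Nat.lt_two_pow_self (Nat.pow_le_pow_right (by norm_num) (by omega)))
      have h2 : n.testBit (m + n) = false := Nat.testBit_lt_two_pow
        (lt_of_lt_of_le Nat.lt_two_pow_self (Nat.pow_le_pow_right (by norm_num) (by omega)))
      have := h (m + n)
      simp [Int.testBit, h1, h2] at this
  | negSucc m =>
    cases b with
    | ofNat n =>
      exfalso
      have h1 : m.testBit (m + n) = false := Nat.testBit_lt_two_pow
        (lt_of_lt_of_le Nat.lt_two_pow_self (Nat.pow_le_pow_right (by norm_num) (by omega)))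
      have h2 : n.testBit (m + n) = false := Nat.testBit_lt_two_pow
        (lt_of_lt_of_le Nat.lt_two_pow_self (Nat.pow_le_pow_right (by norm_num) (by omega)))
      have := h (m + n)
      simp [Int.testBit, h1, h2] at this
    | negSucc n =>
      refine congrArg Int.negSucc (Nat.eq_of_testBit_eq fun k => ?_)
      have := h k
      simp only [Int.testBit] at this
      exact Bool.not_inj this

theorem itb_neg_natCast (m : Nat) (hm : 0 < m) (k : Nat) :
    (-(m : Int)).testBit k = !((m - 1).testBit k) := by
  have h : -(m : Int) = Int.negSucc (m - 1) := by rw [Int.negSucc_eq]; omega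
  rw [h]; rfl

theorem itb_one (k : Nat) : ((1 : Int)).testBit k = decide (k = 0) := by
  show (Nat.testBit 1 k) = decide (k = 0)
  cases k with
  | zero => rfl
  | succ k => simp [Nat.testBit_add_one]

theorem itb_shiftRight (a : Int) (i k : Nat) : (a >>> i).testBit k = a.testBit (i + k) := by
  cases a with
  | ofNat m =>
    rw [show (Int.ofNat m) >>> i = Int.ofNat (m >>> i) from rfl]
    simp only [Int.testBit]
    exact Nat.testBit_shiftRight m
  | negSucc m =>
    rw [show (Int.negSucc m) >>> i = Int.negSucc (m >>> i) from rfl]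
    simp only [Int.testBit]
    rw [Nat.testBit_shiftRight]

theorem itb_two_mul_zero (y : Int) : (2 * y).testBit 0 = false := by
  have := Int.testBit_bit_zero false y
  simpa [Int.bit_val] using this

theorem itb_two_mul_succ (y : Int) (k : Nat) : (2 * y).testBit (k + 1) = y.testBit k := by
  have := Int.testBit_bit_succ k false y
  simpa [Int.bit_val] using this

-- ---- PySem's Python-exact band/bor equal Mathlib's Int.land/Int.lor ----

theorem ldiff_div_two (a b : Nat) : (Nat.ldiff a b) / 2 = Nat.ldiff (a / 2) (b / 2) := by
  refine Nat.eq_of_testBit_eq fun k => ?_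
  rw [← Nat.testBit_add_one, Nat.testBit_ldiff, Nat.testBit_ldiff,
      ← Nat.testBit_add_one, ← Nat.testBit_add_one]

theorem and_add_ldiff (m n : Nat) : (m &&& n) + Nat.ldiff m n = m := by
  induction m using Nat.strong_induction_on generalizing n with
  | _ m IH =>
    by_cases hm : m = 0
    · subst hm
      have h1 : 0 &&& n = 0 := Nat.zero_and n
      have h2 : Nat.ldiff 0 n = 0 := by
        refine Nat.eq_of_testBit_eq fun k => ?_
        simp [Nat.testBit_ldiff]
      rw [h1, h2]
    · have hdiv : (m &&& n) / 2 + (Nat.ldiff m n) / 2 = m / 2 := by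
        rw [Nat.and_div_two, ldiff_div_two]
        exact IH (m / 2) (by omega) (n / 2)
      have hmod : (m &&& n) % 2 + (Nat.ldiff m n) % 2 = m % 2 := by
        have h1 : (m &&& n) % 2 = 1 ↔ (m % 2 = 1 ∧ n % 2 = 1) := by
          have h := Nat.testBit_and m n 0
          simp only [Nat.testBit_zero] at h
          rw [← Bool.decide_and] at h
          exact decide_eq_decide.mp h
        have h2 : (Nat.ldiff m n) % 2 = 1 ↔ (m % 2 = 1 ∧ ¬ n % 2 = 1) := by
          have h := Nat.testBit_ldiff m n 0
          simp only [Nat.testBit_zero] at h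
          rw [← decide_not, ← Bool.decide_and] at h
          exact decide_eq_decide.mp h
        omega
      omega

theorem nat_sub_and_eq_ldiff (m n : Nat) : m - (m &&& n) = Nat.ldiff m n := by
  have := and_add_ldiff m n
  omega

theorem band_eq_land (a b : Int) : PySem.Int.band a b = Int.land a b := by
  cases a with
  | ofNat m =>
    cases b with
    | ofNat n =>
      show PySem.Int.band (m : Int) (n : Int) = Int.land (Int.ofNat m) (Int.ofNat n)
      simp [PySem.Int.band]
      rfl
    | negSucc n =>
      show PySem.Int.band (m : Int) (Int.negSucc n) = Int.ofNat (Nat.ldiff m n)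
      have hb : ¬ (0 : Int) ≤ Int.negSucc n := by rw [Int.negSucc_eq]; omega
      have hc : (-(Int.negSucc n) - 1).toNat = n := by rw [Int.negSucc_eq]; omega
      simp only [PySem.Int.band, if_pos (by positivity : (0:Int) ≤ (m:Int)), if_neg hb, hc,
        Int.toNat_natCast]
      rw [nat_sub_and_eq_ldiff]
      rfl
  | negSucc m =>
    cases b with
    | ofNat n =>
      show PySem.Int.band (Int.negSucc m) (n : Int) = Int.ofNat (Nat.ldiff n m)
      have ha : ¬ (0 : Int) ≤ Int.negSucc m := by rw [Int.negSucc_eq]; omega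
      have hc : (-(Int.negSucc m) - 1).toNat = m := by rw [Int.negSucc_eq]; omega
      simp only [PySem.Int.band, if_pos (by positivity : (0:Int) ≤ (n:Int)), if_neg ha, hc,
        Int.toNat_natCast]
      rw [nat_sub_and_eq_ldiff]
      rfl
    | negSucc n =>
      show PySem.Int.band (Int.negSucc m) (Int.negSucc n) = Int.negSucc (m ||| n)
      have ha : ¬ (0 : Int) ≤ Int.negSucc m := by rw [Int.negSucc_eq]; omega
      have hb : ¬ (0 : Int) ≤ Int.negSucc n := by rw [Int.negSucc_eq]; omega
      have hcm : (-(Int.negSucc m) - 1).toNat = m := by rw [Int.negSucc_eq]; omega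
      have hcn : (-(Int.negSucc n) - 1).toNat = n := by rw [Int.negSucc_eq]; omega
      simp only [PySem.Int.band, if_neg ha, if_neg hb, hcm, hcn]
      rw [Int.negSucc_eq]
      ring

theorem bor_eq_lor (a b : Int) : PySem.Int.bor a b = Int.lor a b := by
  cases a with
  | ofNat m =>
    cases b with
    | ofNat n =>
      show PySem.Int.bor (m : Int) (n : Int) = Int.ofNat (m ||| n)
      simp [PySem.Int.bor]
    | negSucc n =>
      show PySem.Int.bor (m : Int) (Int.negSucc n) = Int.negSucc (Nat.ldiff n m)
      have hb : ¬ (0 : Int) ≤ Int.negSucc n := by rw [Int.negSucc_eq]; omega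
      have hc : (-(Int.negSucc n) - 1).toNat = n := by rw [Int.negSucc_eq]; omega
      simp only [PySem.Int.bor, if_pos (by positivity : (0:Int) ≤ (m:Int)), if_neg hb, hc,
        Int.toNat_natCast]
      rw [nat_sub_and_eq_ldiff, Int.negSucc_eq]
      ring
  | negSucc m =>
    cases b with
    | ofNat n =>
      show PySem.Int.bor (Int.negSucc m) (n : Int) = Int.negSucc (Nat.ldiff m n)
      have ha : ¬ (0 : Int) ≤ Int.negSucc m := by rw [Int.negSucc_eq]; omega
      have hc : (-(Int.negSucc m) - 1).toNat = m := by rw [Int.negSucc_eq]; omega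
      simp only [PySem.Int.bor, if_pos (by positivity : (0:Int) ≤ (n:Int)), if_neg ha, hc,
        Int.toNat_natCast]
      rw [nat_sub_and_eq_ldiff, Int.negSucc_eq]
      ring
    | negSucc n =>
      show PySem.Int.bor (Int.negSucc m) (Int.negSucc n) = Int.negSucc (m &&& n)
      have ha : ¬ (0 : Int) ≤ Int.negSucc m := by rw [Int.negSucc_eq]; omega
      have hb : ¬ (0 : Int) ≤ Int.negSucc n := by rw [Int.negSucc_eq]; omega
      have hcm : (-(Int.negSucc m) - 1).toNat = m := by rw [Int.negSucc_eq]; omega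
      have hcn : (-(Int.negSucc n) - 1).toNat = n := by rw [Int.negSucc_eq]; omega
      simp only [PySem.Int.bor, if_neg ha, if_neg hb, hcm, hcn]
      rw [Int.negSucc_eq]
      ring

theorem int_not_add_one (m : Nat) : Int.not (m : Int) + 1 = -(m : Int) := by
  show Int.not (Int.ofNat m) + 1 = _
  have h : Int.not (Int.ofNat m) = Int.negSucc m := rfl
  rw [h, Int.negSucc_eq]
  ring

-- ---- bit identities relating the two loop shapes ----

theorem odd_and_pred (m : Nat) (hm : m % 2 = 1) : m &&& (m - 1) = m - 1 := by
  refine Nat.eq_of_testBit_eq fun k => ?_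
  rw [Nat.testBit_and]
  cases k with
  | zero =>
    simp only [Nat.testBit_zero]
    have h0 : (m - 1) % 2 = 0 := by omega
    simp [hm, h0]
  | succ k =>
    have h : (m - 1) / 2 = m / 2 := by omega
    simp only [Nat.testBit_add_one, h, Bool.and_self]

theorem odd_isolate (occ : Int) (m : Nat) (hm : m % 2 = 1) :
    Int.land (Int.land occ (m : Int)) (-(m : Int)) = Int.land occ 1 := by
  refine itb_ext fun k => ?_
  rw [Int.testBit_land, Int.testBit_land, Int.testBit_land,
      itb_neg_natCast m (by omega) k, itb_one, itb_natCast]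
  cases k with
  | zero =>
    have h1 : m.testBit 0 = true := by simp [Nat.testBit_zero, hm]
    have h2 : (m - 1).testBit 0 = false := by
      simp only [Nat.testBit_zero]
      have h0 : (m - 1) % 2 = 0 := by omega
      simp [h0]
    simp [h1, h2]
  | succ k =>
    have h : (m - 1) / 2 = m / 2 := by omega
    simp only [Nat.testBit_add_one, h]
    cases h' : (m / 2).testBit k <;> simp

theorem even_and_pred (k : Nat) (hk : 0 < k) :
    (2 * k) &&& (2 * k - 1) = 2 * (k &&& (k - 1)) := by
  refine Nat.eq_of_testBit_eq fun j => ?_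
  rw [Nat.testBit_and]
  cases j with
  | zero =>
    simp only [Nat.testBit_zero]
    have h0 : (2 * k) % 2 = 0 := by omega
    have h1 : (2 * (k &&& (k - 1))) % 2 = 0 := by omega
    simp [h0, h1]
  | succ j =>
    have h1 : 2 * k / 2 = k := by omega
    have h2 : (2 * k - 1) / 2 = k - 1 := by omega
    have h3 : 2 * (k &&& (k - 1)) / 2 = k &&& (k - 1) := by omega
    simp only [Nat.testBit_add_one, h1, h2, h3, Nat.testBit_and]

theorem even_isolate (occ : Int) (k : Nat) (hk : 0 < k) :
    Int.land (Int.land occ ((2 * k : Nat) : Int)) (-((2 * k : Nat) : Int)) =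
      2 * Int.land (Int.land (occ >>> (1 : Nat)) (k : Int)) (-(k : Int)) := by
  refine itb_ext fun j => ?_
  cases j with
  | zero =>
    rw [itb_two_mul_zero, Int.testBit_land, Int.testBit_land, itb_natCast]
    have h : (2 * k).testBit 0 = false := by
      simp only [Nat.testBit_zero]
      have h0 : (2 * k) % 2 = 0 := by omega
      simp [h0]
    simp [h]
  | succ j =>
    rw [itb_two_mul_succ, Int.testBit_land, Int.testBit_land, Int.testBit_land, Int.testBit_land,
        itb_neg_natCast (2 * k) (by omega), itb_neg_natCast k hk, itb_shiftRight,
        itb_natCast, itb_natCast]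
    have h1 : (2 * k).testBit (j + 1) = k.testBit j := by
      have h : 2 * k / 2 = k := by omega
      rw [Nat.testBit_add_one, h]
    have h2 : (2 * k - 1).testBit (j + 1) = (k - 1).testBit j := by
      have h : (2 * k - 1) / 2 = k - 1 := by omega
      rw [Nat.testBit_add_one, h]
    rw [h1, h2, Nat.add_comm 1 j]

-- disjoint or is addition: the accumulator stays below the bit being set
theorem nat_lor_two_pow (r j : Nat) (h : r < 2 ^ j) : r ||| 2 ^ j = r + 2 ^ j := by
  refine Nat.eq_of_testBit_eq fun k => ?_
  rcases lt_trichotomy k j with hk | hk | hk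
  · rw [Nat.add_comm, Nat.testBit_two_pow_add_gt hk]
    simp [Nat.testBit_or, Nat.testBit_two_pow]
    omega
  · subst hk
    rw [Nat.add_comm, Nat.testBit_two_pow_add_eq]
    have h1 : r.testBit k = false := Nat.testBit_lt_two_pow h
    simp [Nat.testBit_or, h1]
  · have h1 : r.testBit k = false := Nat.testBit_lt_two_pow
      (lt_of_lt_of_le h (Nat.pow_le_pow_right (by norm_num) (by omega)))
    have h2 : (r + 2 ^ j).testBit k = false := Nat.testBit_lt_two_pow
      (by calc r + 2 ^ j < 2 ^ j + 2 ^ j := by omega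
            _ = 2 ^ (j + 1) := by ring
            _ ≤ 2 ^ k := Nat.pow_le_pow_right (by norm_num) (by omega))
    simp [Nat.testBit_or, Nat.testBit_two_pow, h1, h2]
    omega

theorem int_lor_two_pow (res : Int) (j : Nat) (h0 : 0 ≤ res) (h : res < 2 ^ j) :
    Int.lor res ((2 ^ j : Nat) : Int) = res + 2 ^ j := by
  obtain ⟨r, rfl⟩ := Int.eq_ofNat_of_zero_le h0
  have hr : r < 2 ^ j := by exact_mod_cast h
  show ((r ||| 2 ^ j : Nat) : Int) = _
  rw [nat_lor_two_pow r j hr]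
  push_cast
  ring

theorem int_shiftRight_succ (a : Int) (i : Nat) : (a >>> i) >>> (1 : Nat) = a >>> (i + 1) := by
  rw [Int.shiftRight_eq_div_pow, Int.shiftRight_eq_div_pow, Int.shiftRight_eq_div_pow,
      Int.ediv_ediv_of_nonneg (by positivity)]
  norm_num [pow_succ]

-- ---- the two abstract recursions ----

-- A's recursion, one step per set bit of the mask
def Hfun (occ : Int) (m : Nat) : Int :=
  if h : m = 0 then 0
  else (if Int.land (Int.land occ (m : Int)) (-(m : Int)) ≠ 0 then 1 else 0)
        + 2 * Hfun occ (m &&& (m - 1))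
termination_by m
decreasing_by exact lt_of_le_of_lt Nat.and_le_right (Nat.sub_lt (Nat.pos_of_ne_zero h) one_pos)

-- B's recursion, one step per bit of the mask
def Gfun (occ : Int) (m : Nat) : Int :=
  if h : m = 0 then 0
  else if m % 2 = 1 then
    (if Int.land occ 1 ≠ 0 then 1 else 0) + 2 * Gfun (occ >>> (1 : Nat)) (m / 2)
  else Gfun (occ >>> (1 : Nat)) (m / 2)
termination_by m
decreasing_by all_goals exact Nat.div_lt_self (Nat.pos_of_ne_zero h) one_lt_two

theorem Hfun_even (occ : Int) (k : Nat) : Hfun occ (2 * k) = Hfun (occ >>> (1 : Nat)) k := by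
  induction k using Nat.strong_induction_on generalizing occ with
  | _ k IH =>
    by_cases hk : k = 0
    · subst hk
      simp [Hfun]
    · have hk' := Nat.pos_of_ne_zero hk
      conv_lhs => rw [Hfun]
      conv_rhs => rw [Hfun]
      rw [dif_neg (by omega : ¬ 2 * k = 0), dif_neg hk,
          even_and_pred k hk', even_isolate occ k hk',
          IH (k &&& (k - 1)) (lt_of_le_of_lt Nat.and_le_right (Nat.sub_lt hk' one_pos))]
      have h2 : (2 * Int.land (Int.land (occ >>> (1 : Nat)) (k : Int)) (-(k : Int)) ≠ 0)
          ↔ (Int.land (Int.land (occ >>> (1 : Nat)) (k : Int)) (-(k : Int)) ≠ 0) := by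
        constructor <;> intro h <;> omega
      simp only [h2]

theorem Hfun_eq_Gfun (occ : Int) (m : Nat) : Hfun occ m = Gfun occ m := by
  induction m using Nat.strong_induction_on generalizing occ with
  | _ m IH =>
    by_cases hm : m = 0
    · subst hm
      simp [Hfun, Gfun]
    · by_cases hodd : m % 2 = 1
      · rw [Gfun, dif_neg hm, if_pos hodd, Hfun, dif_neg hm,
            odd_and_pred m hodd, odd_isolate occ m hodd]
        congr 1
        rw [show m - 1 = 2 * (m / 2) by omega, Hfun_even, IH (m / 2) (by omega) (occ >>> (1 : Nat))]
      · rw [Gfun, dif_neg hm, if_neg hodd]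
        calc Hfun occ m = Hfun occ (2 * (m / 2)) := by rw [show 2 * (m / 2) = m by omega]
          _ = Hfun (occ >>> (1 : Nat)) (m / 2) := Hfun_even occ (m / 2)
          _ = Gfun (occ >>> (1 : Nat)) (m / 2) := IH (m / 2) (by omega) (occ >>> (1 : Nat))

-- ---- loop lemmas ----

theorem pextLoop_eq (m : Nat) (occ res : Int) (j : Nat)
    (h0 : 0 ≤ res) (h1 : res < 2 ^ j) :
    pextLoop occ m res ((2 ^ j : Nat) : Int) = res + 2 ^ j * Hfun occ m := by
  induction m using Nat.strong_induction_on generalizing res j with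
  | _ m IH =>
    by_cases hm : m = 0
    · subst hm
      rw [pextLoop, Hfun]
      simp
    · rw [pextLoop, Hfun, dif_neg hm, dif_neg hm]
      simp only [band_eq_land, int_not_add_one]
      have hbb : ((2 ^ j : Nat) : Int) + ((2 ^ j : Nat) : Int) = ((2 ^ (j + 1) : Nat) : Int) := by
        push_cast
        ring
      have hlt : m &&& (m - 1) < m :=
        lt_of_le_of_lt Nat.and_le_right (Nat.sub_lt (Nat.pos_of_ne_zero hm) one_pos)
      by_cases hx : Int.land (Int.land occ (m : Int)) (-(m : Int)) ≠ 0
      · rw [if_pos hx, if_pos hx, bor_eq_lor, int_lor_two_pow res j h0 h1, hbb,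
            IH (m &&& (m - 1)) hlt (res + 2 ^ j) (j + 1) (by positivity)
              (by rw [pow_succ]; omega)]
        ring
      · rw [if_neg hx, if_neg hx, hbb,
            IH (m &&& (m - 1)) hlt res (j + 1) h0
              (by rw [pow_succ]; omega)]
        ring

theorem pextAltLoop_eq (m : Nat) (occ res : Int) (i j : Nat)
    (h0 : 0 ≤ res) (h1 : res < 2 ^ j) :
    pextAltLoop occ m i j res = res + 2 ^ j * Gfun (occ >>> i) m := by
  induction m using Nat.strong_induction_on generalizing res i j with
  | _ m IH =>
    by_cases hm : m = 0
    · subst hm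
      rw [pextAltLoop, Gfun]
      simp
    · rw [pextAltLoop, Gfun, dif_neg hm, dif_neg hm]
      simp only [band_eq_land, bor_eq_lor, Nat.and_one_is_mod, Nat.shiftRight_one]
      have hdiv : m / 2 < m := Nat.div_lt_self (Nat.pos_of_ne_zero hm) one_lt_two
      have hshift : (1 : Int) <<< j = ((2 ^ j : Nat) : Int) := by
        simp [Int.shiftLeft_eq]
      by_cases hodd : m % 2 = 1
      · simp only [if_pos hodd, if_pos (by omega : m % 2 ≠ 0)]
        by_cases hocc : Int.land (occ >>> i) 1 ≠ 0
        · rw [if_pos hocc, if_pos hocc, hshift, int_lor_two_pow res j h0 h1,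
              IH (m / 2) hdiv (res + 2 ^ j) (i + 1) (j + 1) (by positivity)
                (by rw [pow_succ]; omega),
              int_shiftRight_succ]
          ring
        · rw [if_neg hocc, if_neg hocc,
              IH (m / 2) hdiv res (i + 1) (j + 1) h0 (by rw [pow_succ]; omega),
              int_shiftRight_succ]
          ring
      · simp only [if_neg hodd, if_neg (by omega : ¬ m % 2 ≠ 0),
            IH (m / 2) hdiv res (i + 1) j h0 h1, int_shiftRight_succ]

-- ===== VERDICT (by name: the statement is the Claim_ definition above) =====
theorem pext_spec : Claim_equal_pext := by
  intro occ mask _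
  show pext occ mask = pext_alt occ mask
  unfold pext pext_alt
  have hA := pextLoop_eq mask.toNat occ 0 0 le_rfl (by norm_num)
  have hB := pextAltLoop_eq mask.toNat occ 0 0 0 le_rfl (by norm_num)
  have h1 : ((2 ^ 0 : Nat) : Int) = 1 := by norm_num
  rw [h1] at hA
  rw [hA, hB, Hfun_eq_Gfun]
  have h0 : occ >>> (0 : Nat) = occ := by
    rw [Int.shiftRight_eq_div_pow]
    norm_num
  rw [h0]
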